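-- pv_equiv track=rewrite | github.com/Alessandro727/DreamAnalizer | friendliness.py | takeLastFemale
-- ===== SOURCE A (Python) =====
-- def takeLastFemale(lista,char):
-- 	split_list = []
-- 	for i in range(len(lista)):
-- 		if 'she ' in lista[i].lower() or 'her ' in lista[i].lower():
-- 			split_list = lista[:i]
-- 	if split_list != []:
-- 		for k in reversed(split_list):
-- 			if '1F' in k or '1I' in k and k != char:
-- 				lista.remove(lista[i])
-- 				return k
-- 	return '1FSA'
-- ===== SOURCE B (Python) =====
-- def takeLastFemale(lista, char):
--     # Single reversed pass: once the last 'she '/'her '-marked token is seen,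
--     # return the first earlier token carrying '1F' (or '1I' and != char).
--     # Note: A also mutates lista (removes an element) before returning a match;
--     # B is pure -- equivalence is about the return value only.
--     seen_marker = False
--     for k in reversed(lista):
--         if seen_marker:
--             if '1F' in k or ('1I' in k and k != char):
--                 return k
--         else:
--             lk = k.lower()
--             if 'she ' in lk or 'her ' in lk:
--                 seen_marker = True
--     return '1FSA'
-- ===== Notes on version B (the rewrite author's own statement) =====
-- stated objective: alternative
-- what changed: Replaced A's forward loop that re-slices lista[:i] at every she/her match plus a second reversed scan by a single reversed pass that flips a flag at the last marker and returns the first earlier 1F/1I token; B is pure (A also removes an element from lista before returning a match; return values are identical); not measurably faster on the generated inputs.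
import Mathlib
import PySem

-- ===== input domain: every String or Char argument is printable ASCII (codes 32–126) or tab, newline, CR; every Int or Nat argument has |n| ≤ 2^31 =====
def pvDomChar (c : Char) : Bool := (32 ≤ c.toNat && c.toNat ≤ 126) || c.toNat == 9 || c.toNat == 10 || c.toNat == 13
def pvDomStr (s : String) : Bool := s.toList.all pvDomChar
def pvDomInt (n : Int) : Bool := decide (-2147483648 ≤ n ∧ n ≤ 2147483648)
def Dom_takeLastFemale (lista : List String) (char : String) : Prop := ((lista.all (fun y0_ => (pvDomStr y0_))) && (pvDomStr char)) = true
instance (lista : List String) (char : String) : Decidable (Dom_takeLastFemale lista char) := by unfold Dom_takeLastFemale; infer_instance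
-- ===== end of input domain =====

-- B replaces A's repeated slicing + second reversed scan by one single reversed pass (alternative
-- algorithm; not measured faster on the generated inputs);
-- equivalence is about the RETURN value only: A also removes an element from lista before
-- returning a match, B is pure.

-- ===== PORT A =====
-- "'she ' in x.lower() or 'her ' in x.lower()" (shared by both Pythons verbatim)
def pvMarker (s : String) : Bool :=
  PySem.Str.isIn "she " (PySem.Str.lower s) || PySem.Str.isIn "her " (PySem.Str.lower s)

-- "'1F' in k or '1I' in k and k != char" (Python precedence: or of (1F) and (1I ∧ k≠char))
def pvFem (char k : String) : Bool :=
  PySem.Str.isIn "1F" k || (PySem.Str.isIn "1I" k && !(k == char))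

-- first loop of A: split_list, rebuilt as lista[:i] at every matching i
def pvSplit (lista : List String) : List String :=
  (List.range lista.length).foldl
    (fun acc i => if pvMarker (lista.getD i "") then lista.take i else acc) []

-- second loop of A: "for k in reversed(split_list): if …: return k" = first match in the
-- reversed list (the 'lista.remove(lista[i])' mutation does not affect the return value).
def takeLastFemale (lista : List String) (char : String) : String :=
  let split_list := pvSplit lista
  if split_list ≠ [] then
    match split_list.reverse.find? (fun k => pvFem char k) with
    | some k => k
    | none => "1FSA"
  else "1FSA"

-- ===== PORT B =====
-- Source B's single reversed pass with the seen_marker flag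
def pvLoopB (char : String) : List String → Bool → String
  | [], _ => "1FSA"
  | k :: rest, seen =>
    if seen then
      if pvFem char k then k else pvLoopB char rest true
    else
      if pvMarker k then pvLoopB char rest true else pvLoopB char rest false

def takeLastFemale_alt (lista : List String) (char : String) : String :=
  pvLoopB char lista.reverse false

-- ===== PRECONDITION & SPEC =====
def Spec_takeLastFemale (lista : List String) (char : String) (out : String) : Prop := out = takeLastFemale_alt lista char
instance (lista : List String) (char : String) (out : String) : Decidable (Spec_takeLastFemale lista char out) := by unfold Spec_takeLastFemale; infer_instance

-- ===== CLAIM (what is proved, stated in full; the proofs are below) =====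
def Claim_equal_takeLastFemale : Prop := ∀ (lista : List String) (char : String), Dom_takeLastFemale lista char → Spec_takeLastFemale lista char (takeLastFemale lista char)

-- ===== LEMMAS AND PROOFS =====

theorem pvSplit_append (l : List String) (a : String) :
    pvSplit (l ++ [a]) = if pvMarker a then l else pvSplit l := by
  unfold pvSplit
  rw [List.length_append, List.length_singleton, List.range_succ, List.foldl_append]
  have hcongr : (List.range l.length).foldl
      (fun acc i => if pvMarker ((l ++ [a]).getD i "") then (l ++ [a]).take i else acc) [] =
      (List.range l.length).foldl
      (fun acc i => if pvMarker (l.getD i "") then l.take i else acc) [] := by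
    apply PySem.List.foldl_congr_mem
    intro acc i hi
    have hlt : i < l.length := List.mem_range.mp hi
    rw [List.getD_append _ _ _ _ hlt, List.take_append_of_le_length (le_of_lt hlt)]
  rw [hcongr]
  simp [List.take_append_of_le_length (le_refl l.length)]

theorem pvLoopB_true (char : String) (l : List String) :
    pvLoopB char l true =
      match l.find? (fun k => pvFem char k) with
      | some k => k
      | none => "1FSA" := by
  induction l with
  | nil => rfl
  | cons k rest ih =>
    simp only [pvLoopB, List.find?]
    by_cases h : pvFem char k
    · simp [h]
    · simp [h, ih]

theorem pvLoopB_false (char : String) (l : List String) :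
    pvLoopB char l.reverse false =
      match (pvSplit l).reverse.find? (fun k => pvFem char k) with
      | some k => k
      | none => "1FSA" := by
  induction l using List.reverseRecOn with
  | nil => rfl
  | append_singleton l a ih =>
    rw [pvSplit_append, List.reverse_append, List.reverse_singleton, List.singleton_append]
    by_cases h : pvMarker a
    · simp [pvLoopB, h, pvLoopB_true]
    · simpa [pvLoopB, h] using ih

-- ===== VERDICT (by name: the statement is the Claim_ definition above) =====
theorem takeLastFemale_spec : Claim_equal_takeLastFemale := by
  intro lista char _
  unfold Spec_takeLastFemale takeLastFemale takeLastFemale_alt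
  rw [pvLoopB_false]
  by_cases h : pvSplit lista = []
  · simp [h]
  · simp [h]
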